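-- pv_equiv track=rewrite | github.com/Rayality/python_practice | problems/a_hard_set.py | tide_difference
-- ===== SOURCE A (Python) =====
-- def tide_difference(measurements):
--     low = min(measurements)
--     high = max(measurements)
--     difference = high - low
--     low_index = measurements.index(low) + 1
--     high_index = measurements.index(high)
--     section = slice(low_index, high_index)
--
--     if low_index > high_index:
--         return None
--
--     previous_number = low
--
--     for num in measurements[section]:
--         if num < previous_number:
--             return None
--         previous_number = num
--     return difference
-- ===== SOURCE B (Python) =====
-- def tide_difference(measurements):
--     low = min(measurements)
--     high = max(measurements)
--     low_index = measurements.index(low) + 1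
--     high_index = measurements.index(high)
--     if low_index > high_index:
--         return None
--     sec = measurements[low_index:high_index]
--     return high - low if sec == sorted(sec) else None
-- ===== Notes on version B (the rewrite author's own statement) =====
-- stated objective: idiomatic
-- what changed: The hand-written running-previous monotonicity scan (with its vacuous initial comparison against low) is replaced by a sort-and-compare check: the slice between the min and max positions is non-decreasing iff it equals its sorted copy.
import Mathlib
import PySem

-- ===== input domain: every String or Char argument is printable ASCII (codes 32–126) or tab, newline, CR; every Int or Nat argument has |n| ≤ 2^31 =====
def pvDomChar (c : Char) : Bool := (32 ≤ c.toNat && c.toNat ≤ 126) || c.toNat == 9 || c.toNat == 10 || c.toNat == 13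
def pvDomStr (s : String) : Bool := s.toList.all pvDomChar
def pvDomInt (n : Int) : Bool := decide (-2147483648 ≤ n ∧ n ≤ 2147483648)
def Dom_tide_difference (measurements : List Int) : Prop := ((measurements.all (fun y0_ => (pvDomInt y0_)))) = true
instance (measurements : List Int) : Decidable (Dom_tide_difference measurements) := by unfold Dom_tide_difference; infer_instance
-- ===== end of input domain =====

-- One line: B replaces A's running-previous monotonicity scan by a sort-and-compare check of the slice.

-- ===== PORT A =====
-- A's for-loop: previous_number scan, returning None on a decrease, else the difference
def tideScanA (prev : Int) (diff : Int) : List Int → Option Int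
  | [] => some diff
  | n :: rest => if n < prev then none else tideScanA n diff rest

def tide_difference (measurements : List Int) : Option Int :=
  match PySem.List.min? measurements (fun x => x), PySem.List.max? measurements (fun x => x) with
  | some low, some high =>
    let difference := high - low
    match PySem.List.index? measurements low, PySem.List.index? measurements high with
    | some li0, some high_index =>
      let low_index := li0 + 1
      if low_index > high_index then none
      else tideScanA low difference
            (PySem.List.slice measurements (some (low_index : Int)) (some (high_index : Int)))
    | _, _ => none
  | _, _ => none

-- ===== PORT B =====
def tide_difference_alt (measurements : List Int) : Option Int :=
  (PySem.List.min? measurements (fun x => x)).bind fun low =>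
  (PySem.List.max? measurements (fun x => x)).bind fun high =>
  (PySem.List.index? measurements low).bind fun li0 =>
  (PySem.List.index? measurements high).bind fun high_index =>
    let low_index := li0 + 1
    if low_index > high_index then none
    else
      let sec := PySem.List.slice measurements (some (low_index : Int)) (some (high_index : Int))
      if PySem.List.sorted sec (fun x => x) false = sec then some (high - low) else none

-- ===== PRECONDITION & SPEC =====
-- Pre_ excludes only the empty list, on which Python A raises ValueError (min of empty sequence).
def Pre_tide_difference (measurements : List Int) : Prop := measurements ≠ []
instance (measurements : List Int) : Decidable (Pre_tide_difference measurements) := by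
  unfold Pre_tide_difference; infer_instance
def pvWitness_tide_difference : List Int := ([1, 2, 3] : List Int)

def Spec_tide_difference (measurements : List Int) (out : Option Int) : Prop := out = tide_difference_alt measurements
instance (measurements : List Int) (out : Option Int) : Decidable (Spec_tide_difference measurements out) := by unfold Spec_tide_difference; infer_instance

-- ===== CLAIM (what is proved, stated in full; the proofs are below) =====
def Claim_equal_tide_difference : Prop := ∀ (measurements : List Int), Dom_tide_difference measurements → Pre_tide_difference measurements → Spec_tide_difference measurements (tide_difference measurements)

-- ===== LEMMAS AND PROOFS =====

-- A's scan succeeds exactly when prev :: sec forms a ≤-chain.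
lemma tideScanA_eq_ite (sec : List Int) : ∀ (prev diff : Int),
    tideScanA prev diff sec = if (prev :: sec).Pairwise (· ≤ ·) then some diff else none := by
  induction sec with
  | nil => intro prev diff; simp [tideScanA]
  | cons n rest ih =>
    intro prev diff
    simp only [tideScanA, ih]
    by_cases h : n < prev
    · have : ¬ (prev :: n :: rest).Pairwise (· ≤ ·) := by
        intro hp
        have := (List.pairwise_cons.1 hp).1 n (by simp)
        omega
      simp [h, this]
    · have hpn : prev ≤ n := by omega
      have heq : (prev :: n :: rest).Pairwise (· ≤ ·) ↔ (n :: rest).Pairwise (· ≤ ·) := by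
        constructor
        · exact fun hp => (List.pairwise_cons.1 hp).2
        · intro hp
          refine List.pairwise_cons.2 ⟨?_, hp⟩
          intro y hy
          rcases List.mem_cons.1 hy with rfl | hy
          · exact hpn
          · exact le_trans hpn ((List.pairwise_cons.1 hp).1 y hy)
      simp [h, heq]

-- sorted(sec) == sec  ↔  sec is pairwise non-decreasing
lemma sorted_eq_self_iff (sec : List Int) :
    PySem.List.sorted sec (fun x => x) false = sec ↔ sec.Pairwise (· ≤ ·) := by
  constructor
  · intro h
    have := PySem.List.sorted_pairwise sec (fun x => x)
    rw [h] at this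
    exact this
  · intro h
    exact PySem.List.sorted_eq_self_of_pairwise _ _ h

-- With low ≤ every element of sec, the leading comparison is vacuous.
lemma chain_iff_pairwise_of_min (low : Int) (sec : List Int)
    (hlow : ∀ x ∈ sec, low ≤ x) :
    (low :: sec).Pairwise (· ≤ ·) ↔ sec.Pairwise (· ≤ ·) := by
  constructor
  · intro h; exact h.of_cons
  · intro h; exact List.Pairwise.cons hlow h

theorem tide_difference_spec_aux (measurements : List Int)
    (_ : Pre_tide_difference measurements) :
    tide_difference measurements = tide_difference_alt measurements := by
  unfold tide_difference tide_difference_alt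
  cases hmin : PySem.List.min? measurements (fun x => x) with
  | none => rfl
  | some low =>
    cases hmax : PySem.List.max? measurements (fun x => x) with
    | none => rfl
    | some high =>
      cases hli : PySem.List.index? measurements low with
      | none => simp only [Option.bind_some, hli]; rfl
      | some li0 =>
        cases hhi : PySem.List.index? measurements high with
        | none => simp only [Option.bind_some, hli, hhi]; rfl
        | some high_index =>
          simp only [hli, hhi, Option.bind_some]
          set sec := PySem.List.slice measurements (some ((li0 + 1 : Nat) : Int))
              (some ((high_index : Nat) : Int)) with hsec
          have hsub : ∀ x ∈ sec, x ∈ measurements := by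
            intro x hx
            rw [hsec, PySem.List.slice_natCast] at hx
            exact List.mem_of_mem_drop (List.mem_of_mem_take hx)
          have hlow : ∀ x ∈ sec, low ≤ x := fun x hx =>
            PySem.List.min?_isMin hmin x (hsub x hx)
          split_ifs with hgt hs
          · rfl
          · rw [tideScanA_eq_ite,
              if_pos ((chain_iff_pairwise_of_min low sec hlow).2 ((sorted_eq_self_iff sec).1 hs))]
          · rw [tideScanA_eq_ite,
              if_neg (fun hp => hs ((sorted_eq_self_iff sec).2
                ((chain_iff_pairwise_of_min low sec hlow).1 hp)))]

-- ===== VERDICT (by name: the statement is the Claim_ definition above) =====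
theorem tide_difference_spec : Claim_equal_tide_difference := by
  intro ms _ hpre
  unfold Spec_tide_difference
  exact tide_difference_spec_aux ms hpre
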